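-- pv_equiv track=rewrite | github.com/dohangusto/e-kyc-skripsi | services/api-AI-support/internal/service/liveness_service.py | _match_sequences
-- ===== SOURCE A (Python) =====
-- from typing import List, Sequence
--
-- def _normalize_sequence(gestures: Sequence[str]) -> List[str]:
--     return [gesture.upper() for gesture in gestures]
--
-- def _match_sequences(expected: Sequence[str], detected: Sequence[set[str]]) -> tuple[List[str], List[str]]:
--     normalized = _normalize_sequence(expected)
--     matched: List[str] = []
--     missing: List[str] = []
--     if not normalized:
--         return matched, missing
--     pointer = 0
--     for target in normalized:
--         found = False
--         while pointer < len(detected):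
--             current = detected[pointer]
--             pointer += 1
--             if target in current:
--                 matched.append(target)
--                 found = True
--                 break
--         if not found:
--             missing.append(target)
--     return matched, missing
-- ===== SOURCE B (Python) =====
-- from typing import List, Sequence
--
-- def _match_sequences(expected: Sequence[str], detected: Sequence[set[str]]) -> tuple[List[str], List[str]]:
--     # Single pass over `detected`, carrying the still-unmatched targets as a list;
--     # whatever remains after the pass is the missing suffix.
--     rest = [gesture.upper() for gesture in expected]
--     matched: List[str] = []
--     for current in detected:
--         if rest and rest[0] in current:
--             matched.append(rest[0])
--             rest = rest[1:]
--     return matched, rest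
-- ===== Notes on version B (the rewrite author's own statement) =====
-- stated objective: simpler
-- what changed: B replaces A's per-target inner while loop with a pointer into detected by a single pass over detected that carries the still-unmatched expected targets as a list; the leftover of that list is missing, so the inner loop, the pointer arithmetic and the per-target missing appends disappear.
import Mathlib
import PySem

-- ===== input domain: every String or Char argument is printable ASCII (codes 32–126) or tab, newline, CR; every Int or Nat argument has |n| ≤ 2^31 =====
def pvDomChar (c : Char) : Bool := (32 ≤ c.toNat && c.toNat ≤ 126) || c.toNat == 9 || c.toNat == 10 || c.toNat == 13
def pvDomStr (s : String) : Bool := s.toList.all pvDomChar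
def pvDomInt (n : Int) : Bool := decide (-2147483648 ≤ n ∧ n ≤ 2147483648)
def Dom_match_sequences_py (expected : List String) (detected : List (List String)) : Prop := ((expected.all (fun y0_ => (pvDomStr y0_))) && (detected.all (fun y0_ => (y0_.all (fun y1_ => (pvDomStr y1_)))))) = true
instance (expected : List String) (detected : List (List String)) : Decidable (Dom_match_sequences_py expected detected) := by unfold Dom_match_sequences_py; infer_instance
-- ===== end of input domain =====

-- B replaces A's per-target inner while/pointer scan by a single pass over `detected`
-- carrying the still-unmatched targets as a list; the leftover list is `missing` (objective: simpler).

-- ===== PORT A =====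
-- helper: [gesture.upper() for gesture in gestures]
def pvUpperList (gestures : List String) : List String := gestures.map PySem.Str.upper

-- the inner `while pointer < len(detected)` loop of A; returns (found, new pointer)
def pvWhileA (detected : List (List String)) (target : String) (pointer : Nat) : Bool × Nat :=
  if h : pointer < detected.length then
    if target ∈ detected[pointer] then (true, pointer + 1)
    else pvWhileA detected target (pointer + 1)
  else (false, pointer)
termination_by detected.length - pointer

-- the body of A's `for target in normalized` loop; state = (matched, missing, pointer)
def pvStepA (detected : List (List String)) (st : List String × List String × Nat) (target : String) : List String × List String × Nat :=
  let r := pvWhileA detected target st.2.2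
  if r.1 then (st.1 ++ [target], st.2.1, r.2) else (st.1, st.2.1 ++ [target], r.2)

def match_sequences_py (expected : List String) (detected : List (List String)) : List String × List String :=
  let normalized := pvUpperList expected
  if normalized = [] then ([], [])
  else
    let st := normalized.foldl (pvStepA detected) ([], [], 0)
    (st.1, st.2.1)

-- ===== PORT B =====
-- the body of B's `for current in detected` loop; state = (matched, rest)
def pvStepB (st : List String × List String) (current : List String) : List String × List String :=
  match st.2 with
  | t :: ts => if t ∈ current then (st.1 ++ [t], ts) else st
  | [] => st

def match_sequences_py_alt (expected : List String) (detected : List (List String)) : List String × List String :=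
  detected.foldl pvStepB ([], expected.map PySem.Str.upper)

-- ===== PRECONDITION & SPEC =====
def Spec_match_sequences_py (expected : List String) (detected : List (List String)) (out : List String × List String) : Prop := out = match_sequences_py_alt expected detected
instance (expected : List String) (detected : List (List String)) (out : List String × List String) : Decidable (Spec_match_sequences_py expected detected out) := by unfold Spec_match_sequences_py; infer_instance

-- ===== CLAIM (what is proved, stated in full; the proofs are below) =====
def Claim_equal_match_sequences_py : Prop := ∀ (expected : List String) (detected : List (List String)), Dom_match_sequences_py expected detected → Spec_match_sequences_py expected detected (match_sequences_py expected detected)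

-- ===== LEMMAS AND PROOFS =====

-- the common greedy prefix-matching function both loops compute
def pvGreedy : List String → List (List String) → List String × List String
  | [], _ => ([], [])
  | t :: ts, [] => ([], t :: ts)
  | t :: ts, d :: ds =>
    if t ∈ d then
      let g := pvGreedy ts ds
      (t :: g.1, g.2)
    else pvGreedy (t :: ts) ds

-- the value of A's inner while loop, as a function of the detected suffix: (found, consumed count)
def pvSearch (t : String) : List (List String) → Bool × Nat
  | [] => (false, 0)
  | d :: ds => if t ∈ d then (true, 1) else ((pvSearch t ds).1, (pvSearch t ds).2 + 1)

theorem pvSearch_le (t : String) (l : List (List String)) : (pvSearch t l).2 ≤ l.length := by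
  induction l with
  | nil => simp [pvSearch]
  | cons d ds ih => by_cases h : t ∈ d <;> simp [pvSearch, h] <;> omega

theorem pvSearch_false (t : String) (l : List (List String)) (h : (pvSearch t l).1 = false) :
    (pvSearch t l).2 = l.length := by
  induction l with
  | nil => simp [pvSearch]
  | cons d ds ih =>
    by_cases hd : t ∈ d
    · simp [pvSearch, hd] at h
    · simp [pvSearch, hd] at h ⊢; exact ih h

theorem pvWhileA_spec_aux (t : String) : ∀ (n : Nat) (ds : List (List String)) (p : Nat),
    ds.length - p ≤ n →
    pvWhileA ds t p = ((pvSearch t (ds.drop p)).1, p + (pvSearch t (ds.drop p)).2) := by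
  intro n
  induction n with
  | zero =>
    intro ds p hp
    have hle : ds.length ≤ p := by omega
    rw [List.drop_of_length_le hle]
    unfold pvWhileA
    rw [dif_neg (by omega)]
    simp [pvSearch]
  | succ n ih =>
    intro ds p hp
    by_cases h : p < ds.length
    · rw [List.drop_eq_getElem_cons h]
      unfold pvWhileA
      rw [dif_pos h]
      by_cases hd : t ∈ ds[p]
      · simp [pvSearch, hd]
      · rw [if_neg hd, ih ds (p + 1) (by omega), ← List.drop_eq_getElem_cons h]
        rw [List.drop_eq_getElem_cons h]
        simp [pvSearch, hd]
        omega
    · have hle : ds.length ≤ p := by omega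
      rw [List.drop_of_length_le hle]
      unfold pvWhileA
      rw [dif_neg (by omega)]
      simp [pvSearch]

theorem pvWhileA_spec (t : String) (ds : List (List String)) (p : Nat) :
    pvWhileA ds t p = ((pvSearch t (ds.drop p)).1, p + (pvSearch t (ds.drop p)).2) :=
  pvWhileA_spec_aux t (ds.length - p) ds p le_rfl

theorem pvGreedy_nil_right (ns : List String) : pvGreedy ns [] = ([], ns) := by
  cases ns <;> simp [pvGreedy]

theorem pvGreedy_search (t : String) (ts : List String) : ∀ sfx : List (List String),
    pvGreedy (t :: ts) sfx =
      if (pvSearch t sfx).1 then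
        (t :: (pvGreedy ts (sfx.drop (pvSearch t sfx).2)).1,
          (pvGreedy ts (sfx.drop (pvSearch t sfx).2)).2)
      else ([], t :: ts) := by
  intro sfx
  induction sfx with
  | nil => simp [pvGreedy, pvSearch]
  | cons d ds ih =>
    by_cases hd : t ∈ d
    · simp [pvGreedy, pvSearch, hd]
    · simp [pvGreedy, pvSearch, hd, ih]

theorem foldA_exhausted (ds : List (List String)) : ∀ (ts m mi : List String),
    List.foldl (pvStepA ds) (m, mi, ds.length) ts = (m, mi ++ ts, ds.length) := by
  intro ts
  induction ts with
  | nil => intro m mi; simp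
  | cons t ts ih =>
    intro m mi
    have hw : pvWhileA ds t ds.length = (false, ds.length) := by
      rw [pvWhileA_spec, List.drop_of_length_le le_rfl]; simp [pvSearch]
    simp only [List.foldl_cons, pvStepA, hw]
    rw [if_neg (by simp)]
    simpa using ih (m) (mi ++ [t])

theorem foldA_spec (ds : List (List String)) : ∀ (ns m mi : List String) (p : Nat), p ≤ ds.length →
    (List.foldl (pvStepA ds) (m, mi, p) ns).1 = m ++ (pvGreedy ns (ds.drop p)).1 ∧
    (List.foldl (pvStepA ds) (m, mi, p) ns).2.1 = mi ++ (pvGreedy ns (ds.drop p)).2 := by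
  intro ns
  induction ns with
  | nil => intro m mi p hp; simp [pvGreedy]
  | cons t ts ih =>
    intro m mi p hp
    have hw := pvWhileA_spec t ds p
    set sfx := ds.drop p with hsfx
    rw [pvGreedy_search]
    by_cases hf : (pvSearch t sfx).1
    · have hle : (pvSearch t sfx).2 ≤ sfx.length := pvSearch_le t sfx
      have hlen : sfx.length = ds.length - p := by rw [hsfx]; simp
      have hdd : ds.drop (p + (pvSearch t sfx).2) = sfx.drop (pvSearch t sfx).2 := by
        rw [hsfx, List.drop_drop]
      have := ih (m ++ [t]) mi (p + (pvSearch t sfx).2) (by omega)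
      rw [hdd] at this
      simp only [List.foldl_cons, pvStepA, hw, hf, if_true]
      exact ⟨by rw [this.1]; simp, this.2⟩
    · have h2 : (pvSearch t sfx).2 = sfx.length := pvSearch_false t sfx (by simpa using hf)
      have hlen : sfx.length = ds.length - p := by rw [hsfx]; simp
      have hptr : p + (pvSearch t sfx).2 = ds.length := by omega
      have hf' : (pvSearch t sfx).1 = false := by simpa using hf
      simp only [List.foldl_cons, pvStepA, hw, hf', Bool.false_eq_true, if_false]
      rw [hptr, foldA_exhausted]
      simp

theorem foldB_spec : ∀ (ds : List (List String)) (ns m : List String),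
    List.foldl pvStepB (m, ns) ds = (m ++ (pvGreedy ns ds).1, (pvGreedy ns ds).2) := by
  intro ds
  induction ds with
  | nil => intro ns m; rw [pvGreedy_nil_right]; simp
  | cons d ds ih =>
    intro ns m
    cases ns with
    | nil => simp only [List.foldl_cons, pvStepB, pvGreedy]; rw [ih [] m]; simp [pvGreedy]
    | cons t ts =>
      by_cases hd : t ∈ d
      · simp only [List.foldl_cons, pvStepB, hd, if_true]
        rw [ih ts (m ++ [t])]
        simp [pvGreedy, hd]
      · simp only [List.foldl_cons, pvStepB, hd, if_false]
        rw [ih (t :: ts) m]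
        simp [pvGreedy, hd]

-- ===== VERDICT (by name: the statement is the Claim_ definition above) =====
theorem match_sequences_py_spec : Claim_equal_match_sequences_py := by
  intro expected detected _
  unfold Spec_match_sequences_py match_sequences_py match_sequences_py_alt pvUpperList
  rw [foldB_spec]
  set ns := expected.map PySem.Str.upper with hns
  by_cases h : ns = []
  · simp [h, pvGreedy]
  · rw [if_neg h]
    have := foldA_spec detected ns [] [] 0 (by omega)
    simp only [List.drop_zero] at this
    simp only [List.nil_append] at this ⊢
    exact Prod.ext this.1 this.2
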